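-- pv_equiv track=rewrite | github.com/stephanraaijmakers/ba-dl4nlp | code/week1/bbc-keras-lstm-embedding.py | process_labels
-- ===== SOURCE A (Python) =====
-- def process_labels (Y_data):
--     label_id = {}
--     label_name = {}
--     for index, c in enumerate(Y_data):
--         if c in label_id:
--             label = label_id[c]
--         else:
--             label = len(label_id)
--             label_id[c] = label
--             label_name[label] = c
--
--         Y_data[index] = label
--     return Y_data, label_name # for translating back labels to text
-- ===== SOURCE B (Python) =====
-- def process_labels(Y_data):
--     unique = list(dict.fromkeys(Y_data))
--     label_id = {c: i for i, c in enumerate(unique)}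
--     label_name = {i: c for i, c in enumerate(unique)}
--     for i in range(len(Y_data)):
--         Y_data[i] = label_id[Y_data[i]]
--     return Y_data, label_name
-- ===== Notes on version B (the rewrite author's own statement) =====
-- stated objective: simpler
-- what changed: A interleaves dict lookup/extension with rewriting each element in one pass; B first computes the unique labels in first-appearance order (dict.fromkeys), builds both lookup tables by comprehension, then rewrites the list in a separate pass.
import Mathlib
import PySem

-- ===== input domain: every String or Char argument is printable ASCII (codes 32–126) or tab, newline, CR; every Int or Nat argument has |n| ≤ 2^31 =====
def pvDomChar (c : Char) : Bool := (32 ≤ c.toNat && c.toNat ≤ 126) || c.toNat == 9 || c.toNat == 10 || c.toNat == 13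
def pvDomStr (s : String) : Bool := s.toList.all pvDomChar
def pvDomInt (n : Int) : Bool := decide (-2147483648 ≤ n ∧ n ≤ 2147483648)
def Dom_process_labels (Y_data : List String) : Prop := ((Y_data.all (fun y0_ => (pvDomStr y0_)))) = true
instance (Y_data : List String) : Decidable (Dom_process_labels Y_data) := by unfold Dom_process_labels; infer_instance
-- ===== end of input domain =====

-- B builds the label tables first (ordered dedup + two comprehensions) and rewrites in a separate pass,
-- instead of A's single interleaved pass; objective: simpler. Both Pythons mutate Y_data in place the
-- same way; the equivalence proved here is about the return value.

-- ===== PORT A =====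
-- single pass: for index, c in enumerate(Y_data): look up / extend both dicts, overwrite Y_data[index]
def processA : List String → PySem.Dict String Int → PySem.Dict Int String → List Int × PySem.Dict Int String
  | [], _, label_name => ([], label_name)
  | c :: rest, label_id, label_name =>
    match label_id.get? c with
    | some label =>
      let r := processA rest label_id label_name
      (label :: r.1, r.2)
    | none =>
      let label : Int := label_id.size
      let r := processA rest (label_id.insert c label) (label_name.insert label c)
      (label :: r.1, r.2)

def process_labels (Y_data : List String) : List Int × (List (Int × String)) :=
  let r := processA Y_data PySem.Dict.empty PySem.Dict.empty
  (r.1, r.2.items)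

-- ===== PORT B =====
def process_labels_alt (Y_data : List String) : List Int × (List (Int × String)) :=
  let unique := PySem.List.dedup Y_data
  let label_id : PySem.Dict String Int :=
    (PySem.List.enumerate unique).foldl (fun d p => d.insert p.2 p.1) PySem.Dict.empty
  let label_name : PySem.Dict Int String :=
    (PySem.List.enumerate unique).foldl (fun d p => d.insert p.1 p.2) PySem.Dict.empty
  (Y_data.map (fun c => label_id.getD c 0), label_name.items)

-- ===== PRECONDITION & SPEC =====
def Spec_process_labels (Y_data : List String) (out : List Int × (List (Int × String))) : Prop := out = process_labels_alt Y_data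
instance (Y_data : List String) (out : List Int × (List (Int × String))) : Decidable (Spec_process_labels Y_data out) := by unfold Spec_process_labels; infer_instance

-- ===== CLAIM (what is proved, stated in full; the proofs are below) =====
def Claim_equal_process_labels : Prop := ∀ (Y_data : List String), Dom_process_labels Y_data → Spec_process_labels Y_data (process_labels Y_data)

-- ===== LEMMAS AND PROOFS =====

-- the "label_id" dict after seeing exactly the distinct labels `seen` (in order)
def idD (seen : List String) : PySem.Dict String Int :=
  PySem.Dict.mk ((PySem.List.enumerate seen).map (fun p => (p.2, p.1)))

-- the "label_name" dict after seeing exactly `seen`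
def nameD (seen : List String) : PySem.Dict Int String :=
  PySem.Dict.mk (PySem.List.enumerate seen)

-- ordered-dedup step and its fold, seeded with an already-seen prefix
def mergeAll (seen : List String) (xs : List String) : List String :=
  xs.foldl (fun acc c => if c ∈ acc then acc else acc ++ [c]) seen

lemma enumerate_append_singleton (a : String) (xs : List String) (s : Int) :
    PySem.List.enumerate (xs ++ [a]) s = PySem.List.enumerate xs s ++ [(s + xs.length, a)] := by
  induction xs generalizing s with
  | nil => simp [PySem.List.enumerate_nil, PySem.List.enumerate_cons]
  | cons x xs ih => simp [PySem.List.enumerate_cons, ih]; omega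

lemma idxOf_append_self (c : String) (xs : List String) (h : c ∉ xs) :
    (xs ++ [c]).idxOf c = xs.length := by
  induction xs with
  | nil => simp
  | cons x xs ih =>
    simp at h
    rw [List.cons_append, List.idxOf_cons]
    simp [ih h.2, beq_eq_false_iff_ne.mpr (Ne.symm h.1)]

lemma get?_idD (c : String) (seen : List String) (s : Int) :
    (PySem.Dict.mk ((PySem.List.enumerate seen s).map (fun p => (p.2, p.1)))).get? c
      = if c ∈ seen then some (s + seen.idxOf c) else none := by
  induction seen generalizing s with
  | nil => simp [PySem.List.enumerate_nil, PySem.Dict.get?]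
  | cons x xs ih =>
    rw [PySem.List.enumerate_cons]
    by_cases hx : c = x
    · subst hx; simp [PySem.Dict.get?_mk_cons]
    · simp only [List.map_cons, PySem.Dict.get?_mk_cons]
      have : (x == c) = false := beq_eq_false_iff_ne.mpr (Ne.symm hx)
      rw [this]
      simp only [ih]
      by_cases hm : c ∈ xs
      · simp [hm, hx, List.idxOf_cons, beq_eq_false_iff_ne.mpr (Ne.symm hx)]
        omega
      · simp [hm, hx]

lemma get?_nameD_ge (seen : List String) (s k : Int) (h : s + seen.length ≤ k) :
    (PySem.Dict.mk (PySem.List.enumerate seen s)).get? k = none := by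
  induction seen generalizing s with
  | nil => simp [PySem.List.enumerate_nil, PySem.Dict.get?]
  | cons x xs ih =>
    rw [PySem.List.enumerate_cons, PySem.Dict.get?_mk_cons]
    have hne : (s == k) = false := by
      apply beq_eq_false_iff_ne.mpr
      intro he; subst he
      simp only [List.length_cons, Nat.cast_add, Nat.cast_one] at h
      omega
    rw [hne]
    apply ih
    simp only [List.length_cons, Nat.cast_add, Nat.cast_one] at h
    omega

lemma size_idD (seen : List String) : (idD seen).size = (seen.length : Int) := by
  simp [idD, PySem.Dict.size, PySem.List.length_enumerate]

lemma insert_idD (seen : List String) (c : String) (h : c ∉ seen) :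
    (idD seen).insert c (seen.length) = idD (seen ++ [c]) := by
  apply PySem.Dict.ext
  rw [PySem.Dict.items_insert_of_not_contains]
  · simp [idD, enumerate_append_singleton]
  · rw [PySem.Dict.contains_eq_isSome_get?]
    have := get?_idD c seen 0
    simp [idD] at this ⊢
    simp [this, h]

lemma insert_nameD (seen : List String) (c : String) :
    (nameD seen).insert (seen.length) c = nameD (seen ++ [c]) := by
  apply PySem.Dict.ext
  rw [PySem.Dict.items_insert_of_not_contains]
  · simp [nameD, enumerate_append_singleton]
  · rw [PySem.Dict.contains_eq_isSome_get?]
    simp only [nameD]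
    rw [get?_nameD_ge seen 0 seen.length (by simp)]
    rfl

lemma mergeAll_prefix (xs seen : List String) : ∃ t, mergeAll seen xs = seen ++ t := by
  induction xs generalizing seen with
  | nil => exact ⟨[], by simp [mergeAll]⟩
  | cons c rest ih =>
    rw [mergeAll, List.foldl_cons]
    by_cases hc : c ∈ seen
    · simpa [hc] using ih seen
    · simp only [hc, if_false]
      obtain ⟨t, ht⟩ := ih (seen ++ [c])
      exact ⟨c :: t, by simpa using ht⟩

lemma idxOf_mergeAll_of_mem (c : String) (xs seen : List String) (h : c ∈ seen) :
    (mergeAll seen xs).idxOf c = seen.idxOf c := by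
  obtain ⟨t, ht⟩ := mergeAll_prefix xs seen
  rw [ht, List.idxOf_append_of_mem h]

-- A's interleaved pass, started from the state reached after the distinct prefix `seen`
lemma processA_eq (xs : List String) : ∀ seen,
    processA xs (idD seen) (nameD seen)
      = (xs.map (fun c => ((mergeAll seen xs).idxOf c : Int)), nameD (mergeAll seen xs)) := by
  induction xs with
  | nil => intro seen; simp [processA, mergeAll]
  | cons c rest ih =>
    intro seen
    have hget := get?_idD c seen 0
    simp only [Int.zero_add] at hget
    by_cases hc : c ∈ seen
    · have hmerge : mergeAll seen (c :: rest) = mergeAll seen rest := by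
        simp [mergeAll, hc]
      rw [processA]
      simp only [idD] at hget ⊢
      rw [hget]
      simp only [hc, if_true]
      rw [show PySem.Dict.mk ((PySem.List.enumerate seen 0).map (fun p => (p.2, p.1))) = idD seen from rfl, ih seen, hmerge]
      simp [idxOf_mergeAll_of_mem c rest seen hc]
    · have hmerge : mergeAll seen (c :: rest) = mergeAll (seen ++ [c]) rest := by
        simp [mergeAll, hc]
      rw [processA]
      simp only [idD] at hget ⊢
      rw [hget]
      simp only [hc, if_false]
      rw [show PySem.Dict.mk ((PySem.List.enumerate seen 0).map (fun p => (p.2, p.1))) = idD seen from rfl]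
      rw [size_idD, insert_idD seen c hc, insert_nameD seen c, ih (seen ++ [c]), hmerge]
      have hidx : (mergeAll (seen ++ [c]) rest).idxOf c = seen.length := by
        rw [idxOf_mergeAll_of_mem c rest (seen ++ [c]) (by simp), idxOf_append_self c seen hc]
      simp [hidx]

lemma dedup_eq_mergeAll (xs : List String) : PySem.List.dedup xs = mergeAll [] xs := by
  rw [mergeAll, PySem.List.dedup_eq_ofList, PySem.Set.ofList]
  congr 1
  funext acc c
  simp [PySem.Set.add]

-- B's comprehension dicts are exactly idD/nameD of the dedup list
lemma b_label_id (u : List String) (hu : u.Nodup) :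
    (PySem.List.enumerate u).foldl (fun d p => d.insert p.2 p.1) PySem.Dict.empty = idD u := by
  apply PySem.Dict.ext
  rw [PySem.Dict.items_foldl_insert_fresh (PySem.List.enumerate u) Prod.snd Prod.fst
        PySem.Dict.empty (fun a _ => rfl) (by simpa [PySem.List.map_snd_enumerate] using hu)]
  simp [idD, PySem.Dict.empty]

lemma b_label_name (u : List String) :
    (PySem.List.enumerate u).foldl (fun d p => d.insert p.1 p.2) PySem.Dict.empty = nameD u := by
  apply PySem.Dict.ext
  rw [PySem.Dict.items_foldl_insert_fresh (PySem.List.enumerate u) Prod.fst Prod.snd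
        PySem.Dict.empty (fun a _ => rfl)
        (by rw [PySem.List.map_fst_enumerate]; simpa using PySem.List.nodup_pyRange_one 0 u.length)]
  simp [nameD, PySem.Dict.empty]

lemma getD_idD (c : String) (u : List String) (h : c ∈ u) :
    (idD u).getD c 0 = (u.idxOf c : Int) := by
  rw [PySem.Dict.getD_eq_get?_getD]
  have := get?_idD c u 0
  simp only [Int.zero_add] at this
  simp [idD] at this ⊢
  simp [this, h]

-- ===== VERDICT (by name: the statement is the Claim_ definition above) =====
theorem process_labels_spec : Claim_equal_process_labels := by
  intro Y _
  unfold Spec_process_labels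
  have hA : process_labels Y
      = (Y.map (fun c => ((mergeAll [] Y).idxOf c : Int)), (nameD (mergeAll [] Y)).items) := by
    simp only [process_labels]
    rw [show (PySem.Dict.empty : PySem.Dict String Int) = idD [] from rfl,
        show (PySem.Dict.empty : PySem.Dict Int String) = nameD [] from rfl,
        processA_eq Y []]
  have hB : process_labels_alt Y
      = (Y.map (fun c => ((PySem.List.dedup Y).idxOf c : Int)), (nameD (PySem.List.dedup Y)).items) := by
    simp only [process_labels_alt]
    rw [b_label_id _ (PySem.List.nodup_dedup Y), b_label_name]
    congr 1
    apply List.map_congr_left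
    intro c hc
    exact getD_idD c _ ((PySem.List.mem_dedup Y c).mpr hc)
  rw [hA, hB, dedup_eq_mergeAll]
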